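-- pv_equiv track=rewrite | github.com/112224/algorithm | python3/G_카드 교환하기.py | bfs
-- ===== SOURCE A (Python) =====
-- from collections import deque
--
-- def bfs(visit, card, adj, cur):
--     visit[cur] = True
--     q = deque([cur])
--     cards = [card[cur]]
--     member = [cur]
--
--     while q:
--         cur = q.popleft()
--
--         for ele in adj[cur]:
--             if not visit[ele]:
--                 visit[ele] = True
--                 cards.append(card[ele])
--                 member.append(ele)
--                 q.append(ele)
--     ret = 0
--     cards.sort()
--     member.sort()
--     for i in range(len(cards)):
--         ret += abs(member[i] - cards[i] + 1)
--
--     return ret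
-- ===== SOURCE B (Python) =====
-- def bfs(visit, card, adj, cur):
--     # Fixpoint saturation of the component set instead of a deque worklist BFS;
--     # visit is marked once at the end (A marks the same slots during traversal).
--     comp = {cur}
--     for _ in range(len(visit) + 1):
--         changed = False
--         for u in list(comp):
--             for e in adj[u]:
--                 if e not in comp and not visit[e]:
--                     comp.add(e)
--                     changed = True
--         if not changed:
--             break
--     for v in comp:
--         visit[v] = True
--     members = sorted(comp)
--     cards = sorted(card[v] for v in comp)
--     return sum(abs(m - c + 1) for m, c in zip(members, cards))
-- ===== Notes on version B (the rewrite author's own statement) =====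
-- stated objective: alternative
-- what changed: The deque worklist BFS maintaining visit marks and two parallel lists is replaced by round-based fixpoint saturation of a component set (each round absorbs the unvisited neighbours of all current members, stopping when a round adds nothing), with members/cards derived from the set at the end.
-- outside the precondition, e.g. on bfs([False, False], [-3, -3], [[-2, 0], [-2, -1]], 0): A returns 4, B returns 6
import Mathlib
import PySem

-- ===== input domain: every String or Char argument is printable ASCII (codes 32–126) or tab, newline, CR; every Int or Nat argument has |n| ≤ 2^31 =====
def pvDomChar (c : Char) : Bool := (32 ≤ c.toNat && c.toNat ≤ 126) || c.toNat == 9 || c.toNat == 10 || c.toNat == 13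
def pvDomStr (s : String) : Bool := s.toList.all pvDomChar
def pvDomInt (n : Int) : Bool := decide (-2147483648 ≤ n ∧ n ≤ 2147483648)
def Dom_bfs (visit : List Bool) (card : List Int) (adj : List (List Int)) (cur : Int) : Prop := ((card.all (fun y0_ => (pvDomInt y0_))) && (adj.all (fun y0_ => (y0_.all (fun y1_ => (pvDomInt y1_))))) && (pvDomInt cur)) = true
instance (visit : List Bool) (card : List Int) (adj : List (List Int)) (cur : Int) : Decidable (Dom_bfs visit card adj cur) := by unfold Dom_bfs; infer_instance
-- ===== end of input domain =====

-- B replaces the deque BFS by fixpoint saturation over the node range (alternative decomposition,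
-- same cost class on these inputs); A mutates `visit` in place and B marks the same slots — the
-- equivalence proved here is about the return value.

-- ===== PORT A =====
-- state: (visit, queue, cards, member)
def aStep (card : List Int) (t : List Bool × List Int × List Int × List Int) (e : Int) :
    List Bool × List Int × List Int × List Int :=
  if PySem.List.pyGetD t.1 e true = false then
    (PySem.List.pySetD t.1 e true, t.2.1 ++ [e], t.2.2.1 ++ [PySem.List.pyGetD card e 0], t.2.2.2 ++ [e])
  else t

def bfsLoop (card : List Int) (adj : List (List Int)) :
    Nat → List Bool × List Int × List Int × List Int → List Bool × List Int × List Int × List Int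
  | 0, s => s
  | fuel+1, (V, q, cards, member) =>
    match q with
    | [] => (V, [], cards, member)
    | c :: rest =>
      bfsLoop card adj fuel ((PySem.List.pyGetD adj c []).foldl (aStep card) (V, rest, cards, member))

-- fuel n+1 bounds the number of `while q` iterations (each pops one; each push flips a False visit slot)
def bfs (visit : List Bool) (card : List Int) (adj : List (List Int)) (cur : Int) : Int :=
  let V0 := PySem.List.pySetD visit cur true
  let r := bfsLoop card adj (visit.length + 1) (V0, [cur], [PySem.List.pyGetD card cur 0], [cur])
  let cardsS := PySem.List.sorted r.2.2.1 (fun x => x) false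
  let memberS := PySem.List.sorted r.2.2.2 (fun x => x) false
  (PySem.List.pyRange 0 (cardsS.length) 1).foldl
    (fun ret i => ret + |PySem.List.pyGetD memberS i 0 - PySem.List.pyGetD cardsS i 0 + 1|) 0

-- ===== PORT B =====
-- inner loop over adj[u]: state (comp, changed)
def bStep (visit : List Bool) (t : List Int × Bool) (e : Int) : List Int × Bool :=
  if PySem.Set.contains t.1 e = false && PySem.List.pyGetD visit e true = false then
    (PySem.Set.add t.1 e, true)
  else t

-- one saturation pass: for u in list(comp): for e in adj[u]: ...  (the snapshot of comp is folded over)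
def bPass (visit : List Bool) (adj : List (List Int)) (comp : List Int) : List Int × Bool :=
  comp.foldl (fun t u => (PySem.List.pyGetD adj u []).foldl (bStep visit) t) (comp, false)

-- for _ in range(len(visit) + 1): run a pass; break when unchanged
def bLoop (visit : List Bool) (adj : List (List Int)) : Nat → List Int → List Int
  | 0, comp => comp
  | k+1, comp =>
    let t := bPass visit adj comp
    if t.2 then bLoop visit adj k t.1 else t.1

-- (B's final `for v in comp: visit[v] = True` only mutates `visit`; it does not affect the return value)
def bfs_alt (visit : List Bool) (card : List Int) (adj : List (List Int)) (cur : Int) : Int :=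
  let comp := bLoop visit adj (visit.length + 1) (PySem.Set.ofList [cur])
  let members := PySem.List.sorted comp (fun x => x) false
  let cards := PySem.List.sorted (comp.map (fun v => PySem.List.pyGetD card v 0)) (fun x => x) false
  (members.zip cards).foldl (fun r p => r + |p.1 - p.2 + 1|) 0

-- ===== PRECONDITION & SPEC =====
-- the visit slot a Python index denotes (for an index within [-len, len))
def pvSlot (n : Nat) (x : Int) : Int := if x < 0 then x + (n : Int) else x

-- one closure round: add every initially-unvisited neighbour of the set M (labels as Python reads them)
def pvCompStep (visit : List Bool) (adj : List (List Int)) (M : List Int) : List Int :=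
  PySem.Set.update M ((M.flatMap (fun u => PySem.List.pyGetD adj u [])).filter
    (fun e => PySem.List.pyGetD visit e true == false))

def pvCompIter (visit : List Bool) (adj : List (List Int)) : Nat → List Int → List Int
  | 0, M => M
  | k+1, M =>
    let M' := pvCompStep visit adj M
    if M'.length = M.length then M else pvCompIter visit adj k M'

-- the component: node labels reachable from cur through initially-unvisited nodes
def pvComp (visit : List Bool) (adj : List (List Int)) (cur : Int) : List Int :=
  pvCompIter visit adj (cur :: adj.flatten).length [cur]

-- the labels the run touches: the component and everything adjacent to it
def pvLab (visit : List Bool) (adj : List (List Int)) (cur : Int) : List Int :=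
  pvComp visit adj cur ++ (pvComp visit adj cur).flatMap (fun u => PySem.List.pyGetD adj u [])

-- Pre_ is exactly a completed run of A: every index the traversal reads (component members in all three
-- lists, their neighbours in visit) is in Python range, and no two DISTINCT touched labels denote the same
-- visit slot (a raw label -k next to its alias n-k): there the labels recorded per slot depend on
-- traversal order, so A's value is an artefact of its queue order.  Unreached rows are unconstrained.
def Pre_bfs (visit : List Bool) (card : List Int) (adj : List (List Int)) (cur : Int) : Prop :=
  (∀ x ∈ pvLab visit adj cur, ∀ y ∈ pvLab visit adj cur,
    PySem.Raise.InRange visit.length x → PySem.Raise.InRange visit.length y →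
    pvSlot visit.length x = pvSlot visit.length y → x = y) ∧
  (∀ m ∈ pvComp visit adj cur, PySem.Raise.InRange visit.length m ∧
    PySem.Raise.InRange card.length m ∧ PySem.Raise.InRange adj.length m) ∧
  (∀ m ∈ pvComp visit adj cur, ∀ e ∈ PySem.List.pyGetD adj m [], PySem.Raise.InRange visit.length e)
instance (visit : List Bool) (card : List Int) (adj : List (List Int)) (cur : Int) : Decidable (Pre_bfs visit card adj cur) := by unfold Pre_bfs; infer_instance

def pvWitness_bfs : List Bool × List Int × List (List Int) × Int := ([false, false], [1, 2], [[1], [0]], 0)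

def Spec_bfs (visit : List Bool) (card : List Int) (adj : List (List Int)) (cur : Int) (out : Int) : Prop := out = bfs_alt visit card adj cur
instance (visit : List Bool) (card : List Int) (adj : List (List Int)) (cur : Int) (out : Int) : Decidable (Spec_bfs visit card adj cur out) := by unfold Spec_bfs; infer_instance

-- ===== CLAIM (what is proved, stated in full; the proofs are below) =====
def Claim_equal_bfs : Prop := ∀ (visit : List Bool) (card : List Int) (adj : List (List Int)) (cur : Int), Dom_bfs visit card adj cur → Pre_bfs visit card adj cur → Spec_bfs visit card adj cur (bfs visit card adj cur)

-- ===== LEMMAS AND PROOFS =====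

-- `visit[e]` as A/B read it (default true = "skip" when the read raises; never reached on a returning run)
def marked (V : List Bool) (e : Int) : Bool := PySem.List.pyGetD V e true
def markAll (V : List Bool) (M : List Int) : List Bool := M.foldl (fun W v => PySem.List.pySetD W v true) V
def adjOf (adj : List (List Int)) (u : Int) : List Int := PySem.List.pyGetD adj u []
def gcard (card : List Int) (v : Int) : Int := PySem.List.pyGetD card v 0

-- nodes the traversal may collect: cur, plus initially-unvisited neighbours of collected nodes
inductive Reach (visit : List Bool) (adj : List (List Int)) (cur : Int) : Int → Prop
  | base : Reach visit adj cur cur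
  | step {u e : Int} : Reach visit adj cur u → e ∈ adjOf adj u →
      marked visit e = false → Reach visit adj cur e

theorem pyIdx?_eq_slot (n : Nat) (i : Int) :
    PySem.List.pyIdx? n i = if PySem.Raise.InRange n i then some (pvSlot n i).toNat else none := by
  simp only [PySem.List.pyIdx?, PySem.Raise.InRange, pvSlot]
  split_ifs <;> first | rfl | omega | (congr 1; omega)

theorem slot_lt (n : Nat) (i : Int) (h : PySem.Raise.InRange n i) : (pvSlot n i).toNat < n := by
  obtain ⟨h1, h2⟩ := h
  simp only [pvSlot]
  split_ifs <;> omega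

theorem marked_of_notInRange (V : List Bool) (e : Int) (h : ¬ PySem.Raise.InRange V.length e) :
    marked V e = true := by
  rw [marked, PySem.List.pyGetD_of_none _ _ _ (by rwa [PySem.List.pyGet?_eq_none_iff])]

theorem marked_of_inRange (V : List Bool) (e : Int) (h : PySem.Raise.InRange V.length e) :
    marked V e = V[(pvSlot V.length e).toNat]'(slot_lt _ _ h) := by
  rw [marked, PySem.List.pyGetD, PySem.List.pyGet?, pyIdx?_eq_slot, if_pos h]
  simp [List.getElem?_eq_getElem (slot_lt _ _ h)]

theorem pySetD_of_notInRange (V : List Bool) (v : Int) (b : Bool)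
    (h : ¬ PySem.Raise.InRange V.length v) : PySem.List.pySetD V v b = V := by
  rw [PySem.List.pySetD, PySem.List.pySet?, pyIdx?_eq_slot, if_neg h]
  rfl

theorem pySetD_of_inRange (V : List Bool) (v : Int) (b : Bool)
    (h : PySem.Raise.InRange V.length v) :
    PySem.List.pySetD V v b = V.set (pvSlot V.length v).toNat b := by
  rw [PySem.List.pySetD, PySem.List.pySet?, pyIdx?_eq_slot, if_pos h]
  rfl

theorem length_markAll (V : List Bool) (M : List Int) : (markAll V M).length = V.length := by
  induction M generalizing V with
  | nil => rfl
  | cons m M ih => simp [markAll, List.foldl_cons] at *; rw [ih]; simp [PySem.List.length_pySetD]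

-- marking v changes exactly the reads of labels that share v's slot; alias-freedom names that label v
theorem marked_pySetD (V : List Bool) (v e : Int)
    (hal : PySem.Raise.InRange V.length v → PySem.Raise.InRange V.length e →
      pvSlot V.length v = pvSlot V.length e → e = v) :
    marked (PySem.List.pySetD V v true) e = (decide (e = v) || marked V e) := by
  by_cases hv : PySem.Raise.InRange V.length v
  · have hlen : (PySem.List.pySetD V v true).length = V.length := PySem.List.length_pySetD _ _ _
    by_cases he : PySem.Raise.InRange V.length e
    · rw [marked_of_inRange _ _ (by rwa [hlen]), marked_of_inRange _ _ he]
      by_cases hs : pvSlot V.length v = pvSlot V.length e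
      · have hev : e = v := hal hv he hs
        subst hev
        simp only [hlen, pySetD_of_inRange _ _ _ he]
        rw [List.getElem_set]
        simp
      · have hev : ¬ (e = v) := by
          intro h; subst h; exact hs rfl
        simp only [hlen, pySetD_of_inRange _ _ _ hv]
        rw [List.getElem_set]
        have : ¬ ((pvSlot V.length v).toNat = (pvSlot V.length e).toNat) := by
          intro h
          apply hs
          have h1 := hv.1; have h2 := hv.2; have h3 := he.1; have h4 := he.2
          simp only [pvSlot] at h ⊢
          split_ifs at h ⊢ <;> omega
        simp [this, hev]
    · have hev : ¬ (e = v) := by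
        intro h; subst h; exact he hv
      rw [marked_of_notInRange _ _ (by rwa [hlen]), marked_of_notInRange _ _ he]
      simp [hev]
  · rw [pySetD_of_notInRange _ _ _ hv]
    by_cases hev : e = v
    · subst hev
      rw [marked_of_notInRange _ _ hv]
      simp
    · simp [hev]

theorem marked_markAll (V : List Bool) (M : List Int) (e : Int)
    (hM : ∀ m ∈ M, PySem.Raise.InRange V.length m → PySem.Raise.InRange V.length e →
      pvSlot V.length m = pvSlot V.length e → e = m) :
    marked (markAll V M) e = (decide (e ∈ M) || marked V e) := by
  induction M generalizing V with
  | nil => simp [markAll]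
  | cons m M ih =>
    have hm := hM m (by simp)
    have hlen : (PySem.List.pySetD V m true).length = V.length := PySem.List.length_pySetD _ _ _
    have hM' : ∀ x ∈ M, PySem.Raise.InRange (PySem.List.pySetD V m true).length x →
        PySem.Raise.InRange (PySem.List.pySetD V m true).length e →
        pvSlot (PySem.List.pySetD V m true).length x = pvSlot (PySem.List.pySetD V m true).length e → e = x := by
      intro x hx
      rw [hlen]
      exact hM x (by simp [hx])
    have step : markAll V (m :: M) = markAll (PySem.List.pySetD V m true) M := rfl
    rw [step, ih _ hM', marked_pySetD V m e hm]
    by_cases h1 : e ∈ M <;> by_cases h2 : e = m <;> simp [h1, h2]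

theorem cf_set (V : List Bool) (i : Nat) (h : i < V.length) (hf : V[i] = false) :
    (V.set i true).count false + 1 = V.count false := by
  induction V generalizing i with
  | nil => simp at h
  | cons b V ih =>
    cases i with
    | zero => simp_all
    | succ i =>
      simp only [List.set_cons_succ, List.count_cons]
      have := ih i (by simpa using h) (by simpa using hf)
      omega

theorem marked_false_inRange (V : List Bool) (e : Int) (hf : marked V e = false) :
    PySem.Raise.InRange V.length e := by
  by_contra h
  rw [marked_of_notInRange _ _ h] at hf
  exact absurd hf (by simp)

theorem cf_pySetD (V : List Bool) (e : Int) (hf : marked V e = false) :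
    (PySem.List.pySetD V e true).count false + 1 = V.count false := by
  have h := marked_false_inRange V e hf
  rw [pySetD_of_inRange _ _ _ h]
  refine cf_set V (pvSlot V.length e).toNat (slot_lt _ _ h) ?_
  rw [marked_of_inRange _ _ h] at hf
  exact hf

theorem markAll_append (V : List Bool) (M N : List Int) :
    markAll V (M ++ N) = markAll (markAll V M) N := by
  simp [markAll, List.foldl_append]

-- at most one label of the component list is out of range (cur), and in-range labels have distinct slots
theorem comp_length_le (n : Nat) (cur0 : Int) (c : List Int) (hnd : c.Nodup)
    (hio : ∀ v ∈ c, v = cur0 ∨ PySem.Raise.InRange n v)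
    (hAF : ∀ x ∈ c, ∀ y ∈ c, PySem.Raise.InRange n x → PySem.Raise.InRange n y →
      pvSlot n x = pvSlot n y → x = y) :
    c.length ≤ n + 1 := by
  have hinj : ∀ x ∈ c, ∀ y ∈ c, PySem.List.pyIdx? n x = PySem.List.pyIdx? n y → x = y := by
    intro x hx y hy hxy
    rw [pyIdx?_eq_slot, pyIdx?_eq_slot] at hxy
    by_cases h1 : PySem.Raise.InRange n x <;> by_cases h2 : PySem.Raise.InRange n y
    · rw [if_pos h1, if_pos h2] at hxy
      have := Option.some.inj hxy
      refine hAF x hx y hy h1 h2 ?_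
      have hx1 := h1.1; have hx2 := h1.2; have hy1 := h2.1; have hy2 := h2.2
      simp only [pvSlot] at this ⊢
      split_ifs at this ⊢ <;> omega
    · rw [if_pos h1, if_neg h2] at hxy; exact absurd hxy (by simp)
    · rw [if_neg h1, if_pos h2] at hxy; exact absurd hxy.symm (by simp)
    · rcases hio x hx with h | h
      · rcases hio y hy with h' | h'
        · rw [h, h']
        · exact absurd h' h2
      · exact absurd h h1
  have hndm : (c.map (PySem.List.pyIdx? n)).Nodup := hnd.map_on (fun x hx y hy h => hinj x hx y hy h)
  have hsub : c.map (PySem.List.pyIdx? n) ⊆ none :: (List.range n).map some := by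
    intro o ho
    rw [List.mem_map] at ho
    obtain ⟨v, hv, rfl⟩ := ho
    rw [pyIdx?_eq_slot]
    by_cases h : PySem.Raise.InRange n v
    · rw [if_pos h]
      exact List.mem_cons_of_mem _ (List.mem_map.2 ⟨_, List.mem_range.2 (slot_lt n v h), rfl⟩)
    · rw [if_neg h]; simp
  have := (List.subperm_of_subset hndm hsub).length_le
  simpa using this

theorem reach_subset (visit : List Bool) (adj : List (List Int)) (cur : Int) (S : List Int)
    (hcur : cur ∈ S)
    (hcl : ∀ u ∈ S, ∀ e ∈ adjOf adj u, marked visit e = false → e ∈ S) :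
    ∀ v, Reach visit adj cur v → v ∈ S := by
  intro v hr
  induction hr with
  | base => exact hcur
  | step hru hadj hm ih => exact hcl _ ih _ hadj hm

-- every adjacency read yields labels of the input's adjacency lists (or nothing)
theorem adjOf_subset (adj : List (List Int)) (u : Int) :
    ∀ e ∈ adjOf adj u, e ∈ adj.flatten := by
  intro e he
  by_cases h : PySem.Raise.InRange adj.length u
  · exact List.mem_flatten.2 ⟨_, PySem.List.pyGetD_mem adj [] h, he⟩
  · rw [adjOf, PySem.List.pyGetD_of_none _ _ _ (by rwa [PySem.List.pyGet?_eq_none_iff])] at he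
    simp at he

-- the closure function stabilizes within its budget and its fixed point is closed
theorem nodup_subset_length_le {c L : List Int} (hnd : c.Nodup) (hsub : c ⊆ L) :
    c.length ≤ L.length := (List.subperm_of_subset hnd hsub).length_le

theorem pvCompStep_eq_append (visit : List Bool) (adj : List (List Int)) (M : List Int) :
    ∃ new : List Int, pvCompStep visit adj M = M ++ new := by
  rw [pvCompStep, PySem.Set.update_eq_append_filter]
  exact ⟨_, rfl⟩

theorem pvCompIter_spec (visit : List Bool) (adj : List (List Int)) (cur : Int) :
    ∀ (k : Nat) (M : List Int), M.Nodup → (∀ x ∈ M, x ∈ cur :: adj.flatten) →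
    (cur :: adj.flatten).length + 1 ≤ M.length + k →
    ∃ S : List Int, pvCompIter visit adj k M = S ∧ S.Nodup ∧
      (∀ x ∈ S, x ∈ cur :: adj.flatten) ∧ (∀ x ∈ M, x ∈ S) ∧
      (∀ u ∈ S, ∀ e ∈ adjOf adj u, marked visit e = false → e ∈ S) := by
  intro k
  induction k with
  | zero =>
    intro M hnd hsub hlen
    have := nodup_subset_length_le hnd hsub
    omega
  | succ k ih =>
    intro M hnd hsub hlen
    obtain ⟨new, hstep⟩ := pvCompStep_eq_append visit adj M
    by_cases hfix : (pvCompStep visit adj M).length = M.length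
    · have hnew : new = [] := by
        rw [hstep, List.length_append] at hfix
        have : new.length = 0 := by omega
        exact List.eq_nil_of_length_eq_zero this
      have hMfix : pvCompStep visit adj M = M := by rw [hstep, hnew, List.append_nil]
      have hloop : pvCompIter visit adj (k + 1) M = M := by
        simp only [pvCompIter, hfix, if_pos]
      refine ⟨M, hloop, hnd, hsub, fun x hx => hx, ?_⟩
      intro u hu e he hm
      have hmem : e ∈ (M.flatMap (fun u => PySem.List.pyGetD adj u [])).filter
          (fun e => PySem.List.pyGetD visit e true == false) := by
        rw [List.mem_filter]
        refine ⟨List.mem_flatMap.2 ⟨u, hu, he⟩, ?_⟩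
        rw [show PySem.List.pyGetD visit e true = marked visit e from rfl, hm]
        rfl
      have : e ∈ pvCompStep visit adj M := by
        rw [pvCompStep]
        exact (PySem.Set.mem_update _ _ _).2 (Or.inr hmem)
      rwa [hMfix] at this
    · have hloop : pvCompIter visit adj (k + 1) M = pvCompIter visit adj k (pvCompStep visit adj M) := by
        simp only [pvCompIter, hfix, if_false]
      have hnd' : (pvCompStep visit adj M).Nodup := by
        rw [pvCompStep]
        exact PySem.Set.nodup_update _ _ hnd
      have hsub' : ∀ x ∈ pvCompStep visit adj M, x ∈ cur :: adj.flatten := by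
        intro x hx
        rw [pvCompStep] at hx
        rcases (PySem.Set.mem_update _ _ _).1 hx with h | h
        · exact hsub x h
        · rw [List.mem_filter] at h
          obtain ⟨u, _, hu2⟩ := List.mem_flatMap.1 h.1
          exact List.mem_cons_of_mem _ (adjOf_subset adj u x hu2)
      have hgrow : M.length + 1 ≤ (pvCompStep visit adj M).length := by
        rw [hstep, List.length_append] at hfix ⊢
        omega
      obtain ⟨S, hS1, hS2, hS3, hS4, hS5⟩ := ih (pvCompStep visit adj M) hnd' hsub' (by omega)
      refine ⟨S, by rw [hloop, hS1], hS2, hS3, ?_, hS5⟩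
      intro x hx
      refine hS4 x ?_
      rw [hstep]
      exact List.mem_append_left _ hx

theorem pvComp_spec (visit : List Bool) (adj : List (List Int)) (cur : Int) :
    cur ∈ pvComp visit adj cur ∧
    (∀ u ∈ pvComp visit adj cur, ∀ e ∈ adjOf adj u, marked visit e = false → e ∈ pvComp visit adj cur) := by
  obtain ⟨S, hS1, _, _, hS4, hS5⟩ := pvCompIter_spec visit adj cur
    (cur :: adj.flatten).length [cur] (by simp) (by simp)
    (by simp only [List.length_cons, List.length_nil]; omega)
  rw [pvComp, hS1]
  exact ⟨hS4 cur (by simp), hS5⟩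

-- spec of the inner `for ele in adj[cur]` fold of A
theorem aFold_spec (card : List Int) (n : Nat) (L : List Int)
    (hAF : ∀ x ∈ L, ∀ y ∈ L, PySem.Raise.InRange n x → PySem.Raise.InRange n y →
      pvSlot n x = pvSlot n y → x = y)
    (l : List Int) (hl : ∀ e ∈ l, e ∈ L) :
    ∀ (V : List Bool) (q cards member : List Int), V.length = n →
    ∃ new : List Int,
      l.foldl (aStep card) (V, q, cards, member) =
        (markAll V new, q ++ new, cards ++ new.map (gcard card), member ++ new) ∧
      new.Nodup ∧ (∀ x ∈ new, x ∈ l ∧ marked V x = false) ∧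
      (∀ e ∈ l, marked (markAll V new) e = true) ∧
      (markAll V new).count false + new.length = V.count false := by
  induction l with
  | nil =>
    intro V q cards member hV
    exact ⟨[], by simp [markAll], by simp, by simp, by simp, by simp [markAll]⟩
  | cons e l' ih =>
    intro V q cards member hV
    have heL := hl e (by simp)
    have hl' : ∀ x ∈ l', x ∈ L := fun x hx => hl x (by simp [hx])
    have halE : ∀ x ∈ L, PySem.Raise.InRange V.length x → PySem.Raise.InRange V.length e →
        pvSlot V.length x = pvSlot V.length e → e = x := by
      intro x hx h1 h2 h3
      rw [hV] at h1 h2 h3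
      exact (hAF x hx e heL h1 h2 h3).symm
    simp only [List.foldl_cons]
    by_cases hm : marked V e = false
    · have hstep : aStep card (V, q, cards, member) e =
          (PySem.List.pySetD V e true, q ++ [e], cards ++ [gcard card e], member ++ [e]) := by
        simp only [aStep]
        rw [show PySem.List.pyGetD V e true = marked V e from rfl, hm]
        rfl
      rw [hstep]
      have hV' : (PySem.List.pySetD V e true).length = n := by
        simp [PySem.List.length_pySetD, hV]
      obtain ⟨new', hfold, hnd, hmem, hcl, hcf⟩ :=
        ih hl' (PySem.List.pySetD V e true) (q ++ [e]) (cards ++ [gcard card e]) (member ++ [e]) hV'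
      have hmarkede : marked (PySem.List.pySetD V e true) e = true := by
        rw [marked_pySetD V e e (fun _ _ _ => rfl)]
        simp
      refine ⟨e :: new', ?_, ?_, ?_, ?_, ?_⟩
      · rw [hfold]
        have h1 : markAll V (e :: new') = markAll (PySem.List.pySetD V e true) new' := rfl
        simp [h1, gcard]
      · refine List.nodup_cons.2 ⟨?_, hnd⟩
        intro hcon
        have hfe := (hmem e hcon).2
        rw [hmarkede] at hfe
        exact absurd hfe (by simp)
      · intro x hx
        rcases List.mem_cons.1 hx with h | h
        · subst h; exact ⟨by simp, hm⟩
        · refine ⟨by simp [(hmem x h).1], ?_⟩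
          by_contra hne
          have hxt : marked V x = true := by
            cases hxm : marked V x with
            | false => exact absurd hxm hne
            | true => rfl
          have : marked (PySem.List.pySetD V e true) x = true := by
            rw [marked_pySetD V e x (fun h1 h2 h3 => (halE x (hl' x (hmem x h).1) h2 h1 h3.symm).symm), hxt]
            simp
          rw [(hmem x h).2] at this
          exact absurd this (by simp)
      · intro a ha
        have h1 : markAll V (e :: new') = markAll (PySem.List.pySetD V e true) new' := rfl
        rcases List.mem_cons.1 ha with h | h
        · rw [h, h1, marked_markAll _ _ _ (by
            intro x hx hi1 hi2 hs
            rw [hV'] at hi1 hi2 hs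
            exact (hAF x (hl' x (hmem x hx).1) e heL hi1 hi2 hs).symm), hmarkede]
          simp
        · exact hcl a h
      · have h1 : markAll V (e :: new') = markAll (PySem.List.pySetD V e true) new' := rfl
        have h2 := cf_pySetD V e hm
        rw [h1]
        simp only [List.length_cons]
        omega
    · have hmt : marked V e = true := by
        cases hxm : marked V e with
        | false => exact absurd hxm hm
        | true => rfl
      have hstep : aStep card (V, q, cards, member) e = (V, q, cards, member) := by
        simp only [aStep]
        rw [show PySem.List.pyGetD V e true = marked V e from rfl, hmt]
        simp
      rw [hstep]
      obtain ⟨new', hfold, hnd, hmem, hcl, hcf⟩ := ih hl' V q cards member hV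
      refine ⟨new', hfold, hnd, ?_, ?_, hcf⟩
      · intro x hx; exact ⟨by simp [(hmem x hx).1], (hmem x hx).2⟩
      · intro a ha
        rcases List.mem_cons.1 ha with h | h
        · rw [h, marked_markAll _ _ _ (by
            intro x hx hi1 hi2 hs
            rw [hV] at hi1 hi2 hs
            exact (hAF x (hl' x (hmem x hx).1) e heL hi1 hi2 hs).symm), hmt]
          simp
        · exact hcl a h

-- spec of A's while-loop, by induction on fuel
theorem aLoop_spec (visit0 : List Bool) (card : List Int) (adj : List (List Int)) (cur0 : Int)
    (L : List Int)
    (hAF : ∀ x ∈ L, ∀ y ∈ L, PySem.Raise.InRange visit0.length x → PySem.Raise.InRange visit0.length y →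
      pvSlot visit0.length x = pvSlot visit0.length y → x = y)
    (C : List Int)
    (hCclosed : ∀ u ∈ C, ∀ e ∈ adjOf adj u, marked visit0 e = false → e ∈ C)
    (hCL : ∀ u ∈ C, u ∈ L)
    (hCadj : ∀ u ∈ C, ∀ e ∈ adjOf adj u, e ∈ L) :
    ∀ (fuel : Nat) (V : List Bool) (q cards member : List Int),
    V.count false + q.length ≤ fuel →
    V = markAll visit0 member →
    cards = member.map (gcard card) →
    member.Nodup →
    (∀ m ∈ member, m ∈ C) →
    (∀ x ∈ q, x ∈ member) → q.Nodup →
    (∀ m ∈ member, Reach visit0 adj cur0 m) →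
    (∀ m ∈ member, m ∉ q → ∀ e ∈ adjOf adj m, marked V e = true) →
    ∃ S : List Int,
      bfsLoop card adj fuel (V, q, cards, member) =
        (markAll visit0 S, [], S.map (gcard card), S) ∧
      S.Nodup ∧ (∀ m ∈ S, m ∈ C) ∧
      (∀ m ∈ S, Reach visit0 adj cur0 m) ∧ (∀ m ∈ member, m ∈ S) ∧
      (∀ m ∈ S, ∀ e ∈ adjOf adj m, marked (markAll visit0 S) e = true) := by
  intro fuel
  induction fuel with
  | zero =>
    intro V q cards member hfuel hVeq hcards hnd hmemC hq hqnd hreach hclosed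
    have hq0 : q = [] := by
      have : q.length = 0 := by omega
      exact List.eq_nil_of_length_eq_zero this
    subst hq0
    refine ⟨member, ?_, hnd, hmemC, hreach, fun m hm => hm, ?_⟩
    · simp [bfsLoop, hVeq, hcards]
    · intro m hm e he
      have := hclosed m hm (by simp) e he
      rwa [hVeq] at this
  | succ fuel ih =>
    intro V q cards member hfuel hVeq hcards hnd hmemC hq hqnd hreach hclosed
    match q, hq, hqnd, hfuel with
    | [], hq, hqnd, hfuel =>
      refine ⟨member, ?_, hnd, hmemC, hreach, fun m hm => hm, ?_⟩
      · simp [bfsLoop, hVeq, hcards]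
      · intro m hm e he
        have := hclosed m hm (by simp) e he
        rwa [hVeq] at this
    | c :: rest, hq, hqnd, hfuel =>
      have hcmem : c ∈ member := hq c (by simp)
      have hcC : c ∈ C := hmemC c hcmem
      have hmemL : ∀ m ∈ member, m ∈ L := fun m hm => hCL m (hmemC m hm)
      have hVlen : V.length = visit0.length := by
        rw [hVeq, length_markAll]
      have hadjc : ∀ e ∈ adjOf adj c, e ∈ L := hCadj c hcC
      obtain ⟨new, hfold, hndnew, hmemnew, hclnew, hcfnew⟩ :=
        aFold_spec card visit0.length L hAF (adjOf adj c) hadjc V rest cards member hVlen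
      have hmarked_member : ∀ m ∈ member, marked V m = true := by
        intro m hm
        rw [hVeq, marked_markAll visit0 member m
          (fun x hx h1 h2 h3 => (hAF x (hmemL x hx) m (hmemL m hm) h1 h2 h3).symm)]
        simp [hm]
      have hnewL : ∀ x ∈ new, x ∈ L := by
        intro x hx; exact hadjc x (hmemnew x hx).1
      have hdisj : ∀ x ∈ new, x ∉ member := by
        intro x hx hxm
        have h1 := hmarked_member x hxm
        have h2 := (hmemnew x hx).2
        rw [h1] at h2; exact absurd h2 (by simp)
      have hnew0 : ∀ x ∈ new, marked visit0 x = false := by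
        intro x hx
        have h2 := (hmemnew x hx).2
        rw [hVeq, marked_markAll visit0 member x
          (fun m hm h1 h2' h3 => (hAF m (hmemL m hm) x (hnewL x hx) h1 h2' h3).symm)] at h2
        simp only [Bool.or_eq_false_iff] at h2
        exact h2.2
      have hnewC : ∀ x ∈ new, x ∈ C := by
        intro x hx
        exact hCclosed c hcC x (hmemnew x hx).1 (hnew0 x hx)
      have hnewreach : ∀ x ∈ new, Reach visit0 adj cur0 x := by
        intro x hx
        exact Reach.step (hreach c hcmem) (hmemnew x hx).1 (hnew0 x hx)
      have hstep : bfsLoop card adj (fuel + 1) (V, c :: rest, cards, member) =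
          bfsLoop card adj fuel ((adjOf adj c).foldl (aStep card) (V, rest, cards, member)) := rfl
      rw [hstep, hfold]
      have hrest : ∀ x ∈ rest, x ∈ member := fun x hx => hq x (by simp [hx])
      have hfuel2 : V.count false + (rest.length + 1) ≤ fuel + 1 := by simpa using hfuel
      obtain ⟨S, hS1, hS2, hS3, hS4, hS5, hS6⟩ := ih (markAll V new) (rest ++ new)
        (cards ++ new.map (gcard card)) (member ++ new)
        (by simp only [List.length_append]; omega)
        (by rw [hVeq, ← markAll_append])
        (by rw [hcards, List.map_append])
        (by
          refine List.Nodup.append hnd hndnew ?_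
          intro x hx1 hx2
          exact hdisj x hx2 hx1)
        (by
          intro m hm
          rcases List.mem_append.1 hm with h | h
          · exact hmemC m h
          · exact hnewC m h)
        (by
          intro x hx
          rcases List.mem_append.1 hx with h | h
          · exact List.mem_append_left _ (hrest x h)
          · exact List.mem_append_right _ h)
        (by
          refine List.Nodup.append (List.nodup_cons.1 hqnd).2 hndnew ?_
          intro x hx1 hx2
          exact hdisj x hx2 (hrest x hx1))
        (by
          intro m hm
          rcases List.mem_append.1 hm with h | h
          · exact hreach m h
          · exact hnewreach m h)
        (by
          intro m hm hmq e he
          rcases List.mem_append.1 hm with h | h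
          · by_cases hmc : m = c
            · subst hmc
              exact hclnew e he
            · have hmnotq : m ∉ c :: rest := by
                intro hcon
                rcases List.mem_cons.1 hcon with h' | h'
                · exact hmc h'
                · exact hmq (List.mem_append_left _ h')
              have hold := hclosed m h hmnotq e he
              have heL : e ∈ L := hCadj m (hmemC m h) e he
              rw [marked_markAll V new e
                (fun x hx hi1 hi2 hs => by
                  rw [hVlen] at hi1 hi2 hs
                  exact (hAF x (hnewL x hx) e heL hi1 hi2 hs).symm), hold]
              simp
          · exact absurd (List.mem_append_right _ h) hmq)
      refine ⟨S, hS1, hS2, hS3, hS4, ?_, hS6⟩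
      intro m hm
      exact hS5 m (List.mem_append_left _ hm)

-- spec of B's inner fold over adj[u]
theorem bFold_spec (visit0 : List Bool) (l : List Int) :
    ∀ (c : List Int) (ch : Bool),
    ∃ new : List Int,
      l.foldl (bStep visit0) (c, ch) = (c ++ new, ch || decide (new ≠ [])) ∧
      new.Nodup ∧ (∀ x ∈ new, x ∈ l ∧ marked visit0 x = false ∧ x ∉ c) ∧
      (∀ e ∈ l, e ∈ c ++ new ∨ marked visit0 e = true) := by
  induction l with
  | nil => intro c ch; exact ⟨[], by simp, by simp, by simp, by simp⟩
  | cons e l' ih =>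
    intro c ch
    by_cases h1 : e ∈ c
    · have hstep : bStep visit0 (c, ch) e = (c, ch) := by
        simp [bStep, h1]
      simp only [List.foldl_cons, hstep]
      obtain ⟨new', h1', h2', h3', h4'⟩ := ih c ch
      refine ⟨new', h1', h2', ?_, ?_⟩
      · intro x hx; exact ⟨by simp [(h3' x hx).1], (h3' x hx).2.1, (h3' x hx).2.2⟩
      · intro a ha
        rcases List.mem_cons.1 ha with h | h
        · subst h; exact Or.inl (List.mem_append_left _ h1)
        · exact h4' a h
    · by_cases h2 : marked visit0 e = false
      · have h2' : PySem.List.pyGetD visit0 e true = false := h2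
        have hstep : bStep visit0 (c, ch) e = (c ++ [e], true) := by
          simp [bStep, h1, h2', PySem.Set.add_of_not_mem h1]
        simp only [List.foldl_cons, hstep]
        obtain ⟨new', h1', h2', h3', h4'⟩ := ih (c ++ [e]) true
        refine ⟨e :: new', ?_, ?_, ?_, ?_⟩
        · rw [h1']
          simp
        · refine List.nodup_cons.2 ⟨?_, h2'⟩
          intro hcon
          exact (h3' e hcon).2.2 (List.mem_append_right _ (by simp))
        · intro x hx
          rcases List.mem_cons.1 hx with h | h
          · subst h; exact ⟨by simp, h2, h1⟩
          · refine ⟨by simp [(h3' x h).1], (h3' x h).2.1, ?_⟩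
            intro hxc
            exact (h3' x h).2.2 (List.mem_append_left _ hxc)
        · intro a ha
          rcases List.mem_cons.1 ha with h | h
          · subst h; exact Or.inl (by simp)
          · rcases h4' a h with h' | h'
            · exact Or.inl (by simpa using h')
            · exact Or.inr h'
      · have h2t : marked visit0 e = true := by
          cases hm : marked visit0 e
          · exact absurd hm h2
          · rfl
        have h2t' : PySem.List.pyGetD visit0 e true = true := h2t
        have hstep : bStep visit0 (c, ch) e = (c, ch) := by
          simp [bStep, h2t']
        simp only [List.foldl_cons, hstep]
        obtain ⟨new', h1', h2', h3', h4'⟩ := ih c ch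
        refine ⟨new', h1', h2', ?_, ?_⟩
        · intro x hx; exact ⟨by simp [(h3' x hx).1], (h3' x hx).2.1, (h3' x hx).2.2⟩
        · intro a ha
          rcases List.mem_cons.1 ha with h | h
          · subst h; exact Or.inr h2t
          · exact h4' a h

-- spec of B's pass body (fold over a snapshot us of the component set)
theorem bPassAux_spec (visit0 : List Bool) (adj : List (List Int)) (cur0 : Int)
    (C : List Int)
    (hCclosed : ∀ u ∈ C, ∀ e ∈ adjOf adj u, marked visit0 e = false → e ∈ C) :
    ∀ (us : List Int), (∀ u ∈ us, Reach visit0 adj cur0 u ∧ u ∈ C) →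
    ∀ (c : List Int) (ch : Bool), c.Nodup →
    ∃ new : List Int,
      us.foldl (fun t u => (PySem.List.pyGetD adj u []).foldl (bStep visit0) t) (c, ch)
        = (c ++ new, ch || decide (new ≠ [])) ∧
      (c ++ new).Nodup ∧
      (∀ x ∈ new, x ∈ C ∧ Reach visit0 adj cur0 x ∧ marked visit0 x = false) ∧
      (new = [] → ∀ u ∈ us, ∀ e ∈ adjOf adj u, e ∈ c ∨ marked visit0 e = true) := by
  intro us
  induction us with
  | nil =>
    intro _ c ch hnd
    exact ⟨[], by simp, by simpa using hnd, by simp, by simp⟩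
  | cons u us' ih =>
    intro hre c ch hnd
    have hreu := (hre u (by simp)).1
    have huC := (hre u (by simp)).2
    have hre' : ∀ x ∈ us', Reach visit0 adj cur0 x ∧ x ∈ C := fun x hx => hre x (by simp [hx])
    simp only [List.foldl_cons]
    obtain ⟨new1, hf1, hnd1, hmem1, hcl1⟩ := bFold_spec visit0 (adjOf adj u) c ch
    have hnd1' : (c ++ new1).Nodup := by
      refine List.Nodup.append hnd hnd1 ?_
      intro x hx1 hx2
      exact (hmem1 x hx2).2.2 hx1
    rw [show (PySem.List.pyGetD adj u []).foldl (bStep visit0) (c, ch) =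
      (adjOf adj u).foldl (bStep visit0) (c, ch) from rfl, hf1]
    obtain ⟨new2, hf2, hnd2, hmem2, hcl2⟩ := ih hre' (c ++ new1) (ch || decide (new1 ≠ [])) hnd1'
    refine ⟨new1 ++ new2, ?_, ?_, ?_, ?_⟩
    · rw [hf2, List.append_assoc]
      have hb : (ch || decide (new1 ≠ []) || decide (new2 ≠ [])) = (ch || decide (new1 ++ new2 ≠ [])) := by
        cases new1 <;> cases new2 <;> simp
      rw [hb]
    · rw [← List.append_assoc]; exact hnd2
    · intro x hx
      rcases List.mem_append.1 hx with h | h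
      · exact ⟨hCclosed u huC x (hmem1 x h).1 (hmem1 x h).2.1,
          Reach.step hreu (hmem1 x h).1 (hmem1 x h).2.1, (hmem1 x h).2.1⟩
      · exact hmem2 x h
    · intro hne u' hu' e he
      have hne1 : new1 = [] := by
        cases new1
        · rfl
        · simp at hne
      have hne2 : new2 = [] := by
        cases new2
        · rfl
        · rw [List.append_eq_nil_iff] at hne
          exact hne.2
      rcases List.mem_cons.1 hu' with h | h
      · subst h
        rcases hcl1 e he with h' | h'
        · rw [hne1] at h'
          exact Or.inl (by simpa using h')
        · exact Or.inr h'
      · have := hcl2 hne2 u' h e he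
        rcases this with h' | h'
        · rw [hne1] at h'
          exact Or.inl (by simpa using h')
        · exact Or.inr h'

-- spec of B's pass loop, by induction on the remaining pass budget
theorem bLoop_spec (visit0 : List Bool) (adj : List (List Int)) (cur0 : Int) (L : List Int)
    (hAF : ∀ x ∈ L, ∀ y ∈ L, PySem.Raise.InRange visit0.length x → PySem.Raise.InRange visit0.length y →
      pvSlot visit0.length x = pvSlot visit0.length y → x = y)
    (C : List Int)
    (hCclosed : ∀ u ∈ C, ∀ e ∈ adjOf adj u, marked visit0 e = false → e ∈ C)
    (hCL : ∀ u ∈ C, u ∈ L) :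
    ∀ (k : Nat) (c : List Int), c.Nodup →
    (∀ v ∈ c, v ∈ C ∧ Reach visit0 adj cur0 v ∧ (v = cur0 ∨ PySem.Raise.InRange visit0.length v)) →
    visit0.length + 2 ≤ c.length + k →
    ∃ S : List Int, bLoop visit0 adj k c = S ∧ S.Nodup ∧
      (∀ v ∈ S, v ∈ C ∧ Reach visit0 adj cur0 v) ∧
      (∀ x ∈ c, x ∈ S) ∧
      (∀ u ∈ S, ∀ e ∈ adjOf adj u, marked visit0 e = false → e ∈ S) := by
  intro k
  induction k with
  | zero =>
    intro c hnd hprops hlen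
    have hle := comp_length_le visit0.length cur0 c hnd
      (fun v hv => (hprops v hv).2.2)
      (fun x hx y hy => hAF x (hCL x (hprops x hx).1) y (hCL y (hprops y hy).1))
    omega
  | succ k ih =>
    intro c hnd hprops hlen
    obtain ⟨new, hf, hnd', hpnew, hclp⟩ :=
      bPassAux_spec visit0 adj cur0 C hCclosed c
        (fun u hu => ⟨(hprops u hu).2.1, (hprops u hu).1⟩)
        c false hnd
    have hb : bPass visit0 adj c = (c ++ new, false || decide (new ≠ [])) := hf
    by_cases hne : new = []
    · subst hne
      have hloop : bLoop visit0 adj (k + 1) c = c := by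
        simp only [bLoop, hb]
        simp
      refine ⟨c, hloop, hnd, fun v hv => ⟨(hprops v hv).1, (hprops v hv).2.1⟩, fun x hx => hx, ?_⟩
      intro u hu e he hm
      rcases hclp rfl u hu e he with h | h
      · exact h
      · rw [hm] at h; exact absurd h (by simp)
    · have hloop : bLoop visit0 adj (k + 1) c = bLoop visit0 adj k (c ++ new) := by
        simp only [bLoop, hb]
        simp [hne]
      have hlen' : new.length ≥ 1 := by
        cases new
        · exact absurd rfl hne
        · simp
      obtain ⟨S, hS1, hS2, hS3, hS4, hS5⟩ := ih (c ++ new) hnd'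
        (fun v hv => by
          rcases List.mem_append.1 hv with h | h
          · exact hprops v h
          · exact ⟨(hpnew v h).1, (hpnew v h).2.1,
              Or.inr (marked_false_inRange _ _ (hpnew v h).2.2)⟩)
        (by simp only [List.length_append]; omega)
      refine ⟨S, by rw [hloop, hS1], hS2, hS3, ?_, hS5⟩
      intro x hx
      exact hS4 x (List.mem_append_left _ hx)

-- the two final accumulations agree once the sorted lists agree
theorem rangeFold_eq_zipFold (ms cs : List Int) (h : ms.length = cs.length) :
    (PySem.List.pyRange 0 (cs.length) 1).foldl
        (fun ret i => ret + |PySem.List.pyGetD ms i 0 - PySem.List.pyGetD cs i 0 + 1|) 0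
      = (ms.zip cs).foldl (fun r p => r + |p.1 - p.2 + 1|) 0 := by
  have hmap : (PySem.List.pyRange 0 (cs.length) 1).map
        (fun i => |PySem.List.pyGetD ms i 0 - PySem.List.pyGetD cs i 0 + 1|)
      = (ms.zip cs).map (fun p => |p.1 - p.2 + 1|) := by
    apply List.ext_getElem
    · simp [PySem.List.length_pyRange_one, h]
    · intro k hk1 hk2
      simp only [List.getElem_map]
      have hkc : k < cs.length := by
        simpa [PySem.List.length_pyRange_one] using hk1
      have hkm : k < ms.length := by omega
      rw [PySem.List.getElem_pyRange_one]
      have e1 : PySem.List.pyGetD ms (0 + (k : Int)) 0 = ms[k] := by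
        rw [PySem.List.pyGetD_eq_getElem _ _ (by omega) (by omega)]
        congr 1
        omega
      have e2 : PySem.List.pyGetD cs (0 + (k : Int)) 0 = cs[k] := by
        rw [PySem.List.pyGetD_eq_getElem _ _ (by omega) (by omega)]
        congr 1
        omega
      rw [e1, e2]
      have hzk : k < (ms.zip cs).length := by simp [List.length_zip]; omega
      have hz : (ms.zip cs)[k] = (ms[k], cs[k]) := List.getElem_zip
      rw [hz]
  calc (PySem.List.pyRange 0 (cs.length) 1).foldl
        (fun ret i => ret + |PySem.List.pyGetD ms i 0 - PySem.List.pyGetD cs i 0 + 1|) 0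
      = ((PySem.List.pyRange 0 (cs.length) 1).map
          (fun i => |PySem.List.pyGetD ms i 0 - PySem.List.pyGetD cs i 0 + 1|)).foldl (· + ·) 0 := by
        rw [List.foldl_map]
    _ = ((ms.zip cs).map (fun p => |p.1 - p.2 + 1|)).foldl (· + ·) 0 := by rw [hmap]
    _ = (ms.zip cs).foldl (fun r p => r + |p.1 - p.2 + 1|) 0 := by rw [List.foldl_map]

theorem sorted_eq_of_perm (xs ys : List Int) (h : xs.Perm ys) :
    PySem.List.sorted xs (fun x => x) false = PySem.List.sorted ys (fun x => x) false := by
  refine List.eq_of_perm_of_sorted (fun a b _ _ h1 h2 => le_antisymm h1 h2) ?_ ?_ ?_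
  · simpa using PySem.List.sorted_pairwise xs (fun x => x)
  · simpa using PySem.List.sorted_pairwise ys (fun x => x)
  · exact ((PySem.List.sorted_perm xs _ _).trans h).trans (PySem.List.sorted_perm ys _ _).symm

-- ===== VERDICT (by name: the statement is the Claim_ definition above) =====
theorem bfs_spec : Claim_equal_bfs := by
  unfold Claim_equal_bfs
  intro visit card adj cur _ hpre
  unfold Spec_bfs
  unfold Pre_bfs at hpre
  obtain ⟨hAF, -, -⟩ := hpre
  obtain ⟨hcurC, hCclosed⟩ := pvComp_spec visit adj cur
  have hCL : ∀ u ∈ pvComp visit adj cur, u ∈ pvLab visit adj cur := by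
    intro u hu
    exact List.mem_append_left _ hu
  have hCadj : ∀ u ∈ pvComp visit adj cur, ∀ e ∈ adjOf adj u, e ∈ pvLab visit adj cur := by
    intro u hu e he
    exact List.mem_append_right _ (List.mem_flatMap.2 ⟨u, hu, he⟩)
  have hfuel : (PySem.List.pySetD visit cur true).count false + ([cur] : List Int).length ≤ visit.length + 1 := by
    have hc := List.count_le_length (a := false) (l := PySem.List.pySetD visit cur true)
    simp only [PySem.List.length_pySetD] at hc
    simp only [List.length_cons, List.length_nil]
    omega
  obtain ⟨SA, hA1, hA2, hA3, hA4, hA5, hA6⟩ := aLoop_spec visit card adj cur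
    (pvLab visit adj cur) hAF (pvComp visit adj cur) hCclosed hCL hCadj
    (visit.length + 1) (PySem.List.pySetD visit cur true) [cur] [PySem.List.pyGetD card cur 0] [cur]
    hfuel rfl rfl (by simp)
    (by intro m hm; rw [List.mem_singleton] at hm; subst hm; exact hcurC)
    (fun x hx => hx) (by simp)
    (by intro m hm; rw [List.mem_singleton] at hm; subst hm; exact Reach.base)
    (by intro m hm hq; rw [List.mem_singleton] at hm; subst hm; exact absurd (by simp) hq)
  obtain ⟨SB, hB1, hB2, hB3, hB4, hB5⟩ := bLoop_spec visit adj cur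
    (pvLab visit adj cur) hAF (pvComp visit adj cur) hCclosed hCL
    (visit.length + 1) [cur]
    (by simp)
    (by intro v hv; rw [List.mem_singleton] at hv; subst hv; exact ⟨hcurC, Reach.base, Or.inl rfl⟩)
    (by simp only [List.length_cons, List.length_nil]; omega)
  have hAclosed : ∀ u ∈ SA, ∀ e ∈ adjOf adj u, marked visit e = false → e ∈ SA := by
    intro u hu e he hm
    have heL : e ∈ pvLab visit adj cur := hCadj u (hA3 u hu) e he
    have hcl := hA6 u hu e he
    rw [marked_markAll visit SA e
      (fun x hx h1 h2 h3 => (hAF x (hCL x (hA3 x hx)) e heL h1 h2 h3).symm), hm] at hcl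
    simpa using hcl
  have hiff : ∀ a, a ∈ SA ↔ a ∈ SB := by
    intro a
    constructor
    · intro ha
      exact reach_subset visit adj cur SB (hB4 cur (by simp)) hB5 a (hA4 a ha)
    · intro ha
      exact reach_subset visit adj cur SA (hA5 cur (by simp)) hAclosed a ((hB3 a ha).2)
  have hperm : SA.Perm SB := (List.perm_ext_iff_of_nodup hA2 hB2).2 hiff
  have hpermg : (SA.map (gcard card)).Perm (SB.map (gcard card)) := hperm.map _
  have hms : PySem.List.sorted SA (fun x => x) false = PySem.List.sorted SB (fun x => x) false :=
    sorted_eq_of_perm _ _ hperm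
  have hcs : PySem.List.sorted (SA.map (gcard card)) (fun x => x) false
      = PySem.List.sorted (SB.map (gcard card)) (fun x => x) false :=
    sorted_eq_of_perm _ _ hpermg
  have hofl : PySem.Set.ofList ([cur] : List Int) = [cur] := rfl
  have hlen : (PySem.List.sorted SA (fun x => x) false).length
      = (PySem.List.sorted (SA.map (gcard card)) (fun x => x) false).length := by
    simp [PySem.List.length_sorted]
  simp only [bfs, bfs_alt, hofl, hA1, hB1]
  have hg : (fun v => PySem.List.pyGetD card v 0) = gcard card := rfl
  rw [hg, ← hms, ← hcs]
  exact rangeFold_eq_zipFold _ _ hlen
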